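-- pv_equiv track=rewrite | github.com/reiganarmstrong/CMSC-201 | Final/jumble.py | jumble
-- ===== SOURCE A (Python) =====
-- def jumble(a_string,a,b):
--     used_indicies=[]
--     jumbled_string=''
--     for x in range(len(a_string)):
--         possible_index=(a*x+b)%len(a_string)
--         if possible_index not in used_indicies:
--             # exectutes if the possible index has not already been used.
--             jumbled_string+=a_string[possible_index:possible_index+1]
--             used_indicies.append(possible_index)
--     return jumbled_string
-- ===== SOURCE B (Python) =====
-- def jumble(a_string, a, b):
--     # Number-theoretic: (a*x+b) % n is periodic with period n // gcd(a, n), and its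
--     # first period already contains each selected index exactly once, in first-occurrence
--     # order; so no dedup structure is needed at all.
--     n = len(a_string)
--     if n == 0:
--         return ''
--     g, r = abs(a) % n, n
--     while g:
--         g, r = r % g, g
--     # r == gcd(a, n)
--     return ''.join(a_string[(a * x + b) % n] for x in range(n // r))
-- ===== Notes on version B (the rewrite author's own statement) =====
-- stated objective: faster
-- what changed: Drops the dedup structure entirely: the sequence (a*x+b)%n is periodic with period n//gcd(a,n) and its first period lists each selected index exactly once in first-occurrence order, so B computes gcd by Euclid's algorithm and emits exactly the first n//gcd(a,n) characters.
import Mathlib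
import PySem

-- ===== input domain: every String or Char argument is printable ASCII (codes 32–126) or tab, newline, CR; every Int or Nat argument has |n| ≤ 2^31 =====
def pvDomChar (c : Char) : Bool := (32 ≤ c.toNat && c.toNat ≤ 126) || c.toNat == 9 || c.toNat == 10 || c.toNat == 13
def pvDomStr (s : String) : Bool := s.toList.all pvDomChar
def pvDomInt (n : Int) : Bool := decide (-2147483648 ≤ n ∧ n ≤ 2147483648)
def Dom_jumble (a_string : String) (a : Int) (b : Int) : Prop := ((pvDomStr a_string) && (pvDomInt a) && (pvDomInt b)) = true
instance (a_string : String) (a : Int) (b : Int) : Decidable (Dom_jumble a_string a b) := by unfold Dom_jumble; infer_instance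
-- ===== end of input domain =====

-- B drops A's dedup-with-list-scan entirely: (a*x+b)%n is periodic with period n // gcd(a,n)
-- and its first period lists each selected index exactly once in first-occurrence order,
-- so B computes gcd by Euclid and emits exactly that many characters.

-- ===== PORT A =====
-- state: (used_indicies, jumbled_string as List Char)
def jumble (a_string : String) (a : Int) (b : Int) : String :=
  let s := a_string.toList
  let st := (PySem.List.pyRange 0 (PySem.Str.len a_string) 1).foldl
    (fun (st : List Int × List Char) x =>
      let pi := PySem.Int.mod (a * x + b) (PySem.Str.len a_string)
      if !(st.1.contains pi) then
        (st.1 ++ [pi], st.2 ++ PySem.List.slice s (some pi) (some (pi + 1)))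
      else st)
    ([], [])
  String.ofList st.2

-- ===== PORT B =====
-- the while-loop 'while g: g, r = r % g, g' of Source B
def euclidLoop (g r : Int) : Int :=
  if h : g = 0 then r else euclidLoop (PySem.Int.mod r g) g
termination_by g.natAbs
decreasing_by
  rcases lt_or_gt_of_ne h with hg | hg
  · have := PySem.Int.mod_neg_bounds (a := r) hg
    omega
  · have h1 := PySem.Int.mod_nonneg (a := r) hg
    have h2 := PySem.Int.mod_lt (a := r) hg
    omega

def jumble_alt (a_string : String) (a : Int) (b : Int) : String :=
  let s := a_string.toList
  let n : Int := PySem.Str.len a_string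
  if n = 0 then "" else
    let r := euclidLoop (PySem.Int.mod |a| n) n
    String.ofList
      ((PySem.List.pyRange 0 (PySem.Int.floordiv n r) 1).map
        (fun x => PySem.List.pyGetD s (PySem.Int.mod (a * x + b) n) ' '))

-- ===== PRECONDITION & SPEC =====
def Spec_jumble (a_string : String) (a : Int) (b : Int) (out : String) : Prop := out = jumble_alt a_string a b
instance (a_string : String) (a : Int) (b : Int) (out : String) : Decidable (Spec_jumble a_string a b out) := by unfold Spec_jumble; infer_instance

-- ===== CLAIM =====
def Claim_equal_jumble : Prop := ∀ (a_string : String) (a : Int) (b : Int), Dom_jumble a_string a b → Spec_jumble a_string a b (jumble a_string a b)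

-- ===== LEMMAS AND PROOFS =====

-- folding Set.add only appends: the start is a prefix of the result
lemma prefix_foldl_add {α : Type} [BEq α] (l : List α) (u : List α) :
    u <+: l.foldl PySem.Set.add u := by
  induction l generalizing u with
  | nil => exact List.prefix_refl u
  | cons x t ih =>
    refine List.IsPrefix.trans ?_ (ih (PySem.Set.add u x))
    simp only [PySem.Set.add]
    split
    · exact List.prefix_refl u
    · exact ⟨[x], rfl⟩

-- the invariant: A's interleaved fold equals "ordered dedup then index"
lemma fold_eq (s : List Char) (l : List Int)
    (hl : ∀ i ∈ l, 0 ≤ i ∧ i < (s.length : Int)) :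
    ∀ (u : List Int) (acc : List Char),
    (l.foldl
      (fun (st : List Int × List Char) x =>
        if !(st.1.contains x) then
          (st.1 ++ [x], st.2 ++ PySem.List.slice s (some x) (some (x + 1)))
        else st)
      (u, acc))
    = (l.foldl PySem.Set.add u,
       acc ++ ((l.foldl PySem.Set.add u).drop u.length).filterMap
         (fun i => PySem.List.pyGet? s i)) := by
  induction l with
  | nil => intro u acc; simp
  | cons x t ih =>
    intro u acc
    have hx := hl x (by simp)
    have ht : ∀ i ∈ t, 0 ≤ i ∧ i < (s.length : Int) := fun i hi => hl i (by simp [hi])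
    simp only [List.foldl_cons]
    by_cases hc : u.contains x
    · have hm : x ∈ u := by simpa using hc
      have hadd : PySem.Set.add u x = u := by simp [PySem.Set.add, hm]
      rw [show (if !(u.contains x) then
          (u ++ [x], acc ++ PySem.List.slice s (some x) (some (x + 1)))
        else (u, acc)) = (u, acc) by simp [hm]]
      rw [ih ht u acc, hadd]
    · have hm : x ∉ u := by simpa using hc
      have hadd : PySem.Set.add u x = u ++ [x] := by simp [PySem.Set.add, hm]
      rw [show (if !(u.contains x) then
          (u ++ [x], acc ++ PySem.List.slice s (some x) (some (x + 1)))
        else (u, acc)) = (u ++ [x], acc ++ PySem.List.slice s (some x) (some (x + 1))) by simp [hm]]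
      rw [ih ht (u ++ [x]) _, hadd]
      obtain ⟨w, hw⟩ := prefix_foldl_add t (u ++ [x])
      refine Prod.ext rfl ?_
      have hxn : x.toNat < s.length := by omega
      have hdrop1 : (t.foldl PySem.Set.add (u ++ [x])).drop u.length = x :: w := by
        rw [← hw, List.append_assoc, List.drop_left]; rfl
      have hdrop2 : (t.foldl PySem.Set.add (u ++ [x])).drop (u ++ [x]).length = w := by
        rw [← hw, List.drop_left]
      rw [hdrop1, hdrop2]
      have hget : PySem.List.pyGet? s x = some (s[x.toNat]'hxn) := by
        have hx' : x = ((x.toNat : Nat) : Int) := by omega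
        conv_lhs => rw [hx']
        rw [PySem.List.pyGet?_natCast]
        exact List.getElem?_eq_getElem hxn
      have hslice : PySem.List.slice s (some x) (some (x + 1)) = [s[x.toNat]'hxn] := by
        rw [PySem.List.slice_toNat s hx.1 (by omega)]
        have h1 : (x + 1).toNat - x.toNat = 1 := by omega
        rw [h1, List.take_one, List.head?_drop]
        simp [List.getElem?_eq_getElem hxn]
      simp [hslice, hget]

-- all generated indices are in range (when the string is nonempty)
lemma idx_in_range (s : List Char) (a b : Int) (hs : s ≠ []) :
    ∀ i ∈ (PySem.List.pyRange 0 (s.length : Int) 1).map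
      (fun x => PySem.Int.mod (a * x + b) (s.length : Int)), 0 ≤ i ∧ i < (s.length : Int) := by
  intro i hi
  simp only [List.mem_map] at hi
  obtain ⟨x, _, rfl⟩ := hi
  have hpos : (0 : Int) < (s.length : Int) := by
    have : s.length ≠ 0 := fun h => hs (List.eq_nil_of_length_eq_zero h)
    omega
  exact ⟨PySem.Int.mod_nonneg _ hpos, PySem.Int.mod_lt _ hpos⟩

-- B's while loop computes the gcd
lemma euclidLoop_eq_gcd : ∀ (k : Nat) (g r : Int), g.natAbs ≤ k → 0 ≤ g → 0 ≤ r →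
    euclidLoop g r = (Int.gcd g r : Int) := by
  intro k
  induction k with
  | zero =>
    intro g r hk hg hr
    have hg0 : g = 0 := by omega
    rw [euclidLoop]
    simp [hg0, Int.gcd, Int.natAbs_of_nonneg hr]
  | succ k ih =>
    intro g r hk hg hr
    rw [euclidLoop]
    by_cases h0 : g = 0
    · simp [h0, Int.gcd, Int.natAbs_of_nonneg hr]
    · have hgpos : 0 < g := lt_of_le_of_ne hg (Ne.symm h0)
      have hm1 := PySem.Int.mod_nonneg (a := r) hgpos
      have hm2 := PySem.Int.mod_lt (a := r) hgpos
      simp only [h0, dite_false]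
      rw [ih (PySem.Int.mod r g) g (by omega) hm1 hg]
      rw [PySem.Int.mod_eq_emod_of_pos hgpos, Int.gcd_emod, Int.gcd_comm]

-- the central divisibility equivalence: n | a*d iff (n / gcd a n) | d
lemma dvd_mul_iff_period (a n d : Int) (hn : 0 < n) :
    n ∣ a * d ↔ (n / (Int.gcd a n : Int)) ∣ d := by
  have hG0 : 0 < Int.gcd a n := Int.gcd_pos_of_ne_zero_right a (by omega : n ≠ 0)
  have hGpos : (0:Int) < (Int.gcd a n : Int) := by exact_mod_cast hG0
  have hGa : (Int.gcd a n : Int) ∣ a := Int.gcd_dvd_left a n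
  have hGn : (Int.gcd a n : Int) ∣ n := Int.gcd_dvd_right a n
  have hcop : Int.gcd (a / (Int.gcd a n : Int)) (n / (Int.gcd a n : Int)) = 1 :=
    Int.gcd_ediv_gcd_ediv_gcd hG0
  set G : Int := (Int.gcd a n : Int) with hG
  clear_value G
  obtain ⟨a', ha'⟩ := hGa
  obtain ⟨m', hm'⟩ := hGn
  have hqa : a / G = a' := by rw [ha']; exact Int.mul_ediv_cancel_left _ (by omega)
  have hqn : n / G = m' := by rw [hm']; exact Int.mul_ediv_cancel_left _ (by omega)
  rw [hqa, hqn] at hcop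
  rw [hqn]
  constructor
  · intro h
    have h2 : G * m' ∣ G * (a' * d) := by
      rw [← hm', ← mul_assoc, ← ha']; exact h
    have h3 := (mul_dvd_mul_iff_left (by omega : G ≠ 0)).mp h2
    have h4 : m' ∣ d * a' := by rwa [mul_comm] at h3
    refine Int.dvd_of_dvd_mul_left_of_gcd_one h4 ?_
    rw [Int.gcd_comm]; exact hcop
  · intro h
    obtain ⟨e, rfl⟩ := h
    exact ⟨a' * e, by rw [ha', hm']; ring⟩

lemma mod_lin_eq_iff (a b n x y : Int) (hn : 0 < n) :
    PySem.Int.mod (a * x + b) n = PySem.Int.mod (a * y + b) n ↔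
      (n / (Int.gcd a n : Int)) ∣ (x - y) := by
  rw [PySem.Int.mod_eq_emod_of_pos hn, PySem.Int.mod_eq_emod_of_pos hn]
  rw [show ((a*x+b) % n = (a*y+b) % n) ↔ (a*x+b) ≡ (a*y+b) [ZMOD n] from Iff.rfl,
      Int.modEq_iff_dvd,
      show (a*y+b) - (a*x+b) = a*(y-x) from by ring,
      dvd_mul_iff_period a n (y-x) hn, dvd_sub_comm]

-- characterisation of the ordered dedup of the full index list: it is the first period
lemma dedup_first_period (a b n : Int) (hn : 0 < n) :
    PySem.List.dedup
      ((PySem.List.pyRange 0 n 1).map (fun x => PySem.Int.mod (a * x + b) n))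
    = (PySem.List.pyRange 0 (n / (Int.gcd a n : Int)) 1).map
        (fun x => PySem.Int.mod (a * x + b) n) := by
  have hGpos : (0:Int) < (Int.gcd a n : Int) := by
    exact_mod_cast Int.gcd_pos_of_ne_zero_right a (by omega : n ≠ 0)
  have hGn : (Int.gcd a n : Int) ∣ n := Int.gcd_dvd_right a n
  have hnm : n = (Int.gcd a n : Int) * (n / (Int.gcd a n : Int)) := (Int.mul_ediv_cancel' hGn).symm
  have hmpos : 0 < n / (Int.gcd a n : Int) := by
    by_contra hc
    push Not at hc
    nlinarith
  have hmn : n / (Int.gcd a n : Int) ≤ n := by nlinarith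
  have hl1nodup : ((PySem.List.pyRange 0 (n / (Int.gcd a n : Int)) 1).map
      (fun x => PySem.Int.mod (a * x + b) n)).Nodup := by
    refine List.Nodup.map_on ?_ (PySem.List.nodup_pyRange_one 0 _)
    intro x hx y hy hxy
    rw [PySem.List.mem_pyRange_one] at hx hy
    obtain ⟨c, hc⟩ := (mod_lin_eq_iff a b n x y hn).mp hxy
    have hc0 : c = 0 := by nlinarith [hx.1, hx.2, hy.1, hy.2]
    rw [hc0] at hc; omega
  have hl2sub : ∀ y ∈ (PySem.List.pyRange (n / (Int.gcd a n : Int)) n 1).map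
      (fun x => PySem.Int.mod (a * x + b) n),
      y ∈ (PySem.List.pyRange 0 (n / (Int.gcd a n : Int)) 1).map
        (fun x => PySem.Int.mod (a * x + b) n) := by
    intro y hy
    rw [List.mem_map] at hy
    obtain ⟨x, hx, rfl⟩ := hy
    rw [PySem.List.mem_pyRange_one] at hx
    rw [List.mem_map]
    refine ⟨x % (n / (Int.gcd a n : Int)), ?_, ?_⟩
    · rw [PySem.List.mem_pyRange_one]
      exact ⟨Int.emod_nonneg x (by omega), Int.emod_lt_of_pos x hmpos⟩
    · refine (mod_lin_eq_iff a b n (x % (n / (Int.gcd a n : Int))) x hn).mpr ?_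
      exact ⟨-(x / (n / (Int.gcd a n : Int))), by rw [Int.emod_def]; ring⟩
  rw [PySem.List.pyRange_one_append 0 (n / (Int.gcd a n : Int)) n (le_of_lt hmpos) hmn,
      List.map_append, PySem.List.dedup_eq_ofList, PySem.Set.ofList_append,
      PySem.Set.ofList_eq_self_of_nodup _ hl1nodup, PySem.Set.update_eq_append_filter]
  have hfilter : (PySem.Set.ofList ((PySem.List.pyRange (n / (Int.gcd a n : Int)) n 1).map
      (fun x => PySem.Int.mod (a * x + b) n))).filter
        (fun y => !(PySem.Set.contains ((PySem.List.pyRange 0 (n / (Int.gcd a n : Int)) 1).map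
          (fun x => PySem.Int.mod (a * x + b) n)) y)) = [] := by
    rw [List.filter_eq_nil_iff]
    intro y hy
    rw [PySem.Set.mem_ofList] at hy
    have hmem := hl2sub y hy
    simp [PySem.Set.contains, hmem]
  rw [hfilter, List.append_nil]

-- on in-range indices, filterMap pyGet? is map pyGetD
lemma filterMap_pyGet?_eq_map (s : List Char) (l : List Int)
    (hl : ∀ i ∈ l, 0 ≤ i ∧ i < (s.length : Int)) :
    l.filterMap (fun i => PySem.List.pyGet? s i)
    = l.map (fun i => PySem.List.pyGetD s i ' ') := by
  induction l with
  | nil => rfl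
  | cons x t ih =>
    have hx := hl x (by simp)
    have ht : ∀ i ∈ t, 0 ≤ i ∧ i < (s.length : Int) := fun i hi => hl i (by simp [hi])
    have hxn : x.toNat < s.length := by omega
    have hget : PySem.List.pyGet? s x = some (s[x.toNat]'hxn) := by
      have hx' : x = ((x.toNat : Nat) : Int) := by omega
      conv_lhs => rw [hx']
      rw [PySem.List.pyGet?_natCast]
      exact List.getElem?_eq_getElem hxn
    have hgetD : PySem.List.pyGetD s x ' ' = s[x.toNat]'hxn :=
      PySem.List.pyGetD_eq_getElem s ' ' hx.1 hx.2
    simp [List.map_cons, hget, hgetD, ih ht]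

-- ===== VERDICT (by name: the statement is the Claim_ definition above) =====
theorem jumble_spec : Claim_equal_jumble := by
  intro a_string a b _
  unfold Spec_jumble
  simp only [jumble, jumble_alt, PySem.Str.len_eq]
  by_cases hs : a_string.toList = []
  · simp [hs]
  · set s := a_string.toList with hsdef
    have hn : (0 : Int) < (s.length : Int) := by
      have : s.length ≠ 0 := fun h => hs (List.eq_nil_of_length_eq_zero h)
      omega
    set n : Int := (s.length : Int) with hndef
    rw [if_neg (by omega : ¬ n = 0)]
    -- A's fold = dedup then filterMap (the proof from fold_eq)
    have hmap := List.foldl_map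
        (f := fun x => PySem.Int.mod (a * x + b) n)
        (g := fun (st : List Int × List Char) x =>
          if !(st.1.contains x) then
            (st.1 ++ [x], st.2 ++ PySem.List.slice s (some x) (some (x + 1)))
          else st)
        (l := PySem.List.pyRange 0 n 1)
        (init := (([] : List Int), ([] : List Char)))
    rw [← hmap]
    rw [fold_eq s _ (idx_in_range s a b hs) [] []]
    simp only [List.length_nil, List.drop_zero, List.nil_append]
    -- B's gcd loop = Int.gcd a n
    have hgcd : euclidLoop (PySem.Int.mod |a| n) n = (Int.gcd a n : Int) := by
      rw [euclidLoop_eq_gcd (PySem.Int.mod |a| n).natAbs _ _ le_rfl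
            (PySem.Int.mod_nonneg _ hn) (by omega)]
      rw [PySem.Int.mod_eq_emod_of_pos hn, Int.gcd_emod]
      congr 1
      simp [Int.gcd, Int.natAbs_abs]
    rw [hgcd]
    have hGpos : (0 : Int) < (Int.gcd a n : Int) := by
      have := Int.gcd_pos_of_ne_zero_right a (by omega : n ≠ 0)
      exact_mod_cast this
    rw [PySem.Int.floordiv_eq_ediv_of_pos hGpos]
    -- combine: Set.ofList = dedup = first period; filterMap = map
    have h1 : ((PySem.List.pyRange 0 n 1).map
        (fun x => PySem.Int.mod (a * x + b) n)).foldl PySem.Set.add []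
        = PySem.List.dedup ((PySem.List.pyRange 0 n 1).map
            (fun x => PySem.Int.mod (a * x + b) n)) := by
      rw [PySem.List.dedup_eq_ofList, PySem.Set.ofList_eq_foldl]
    rw [h1, dedup_first_period a b n hn,
        filterMap_pyGet?_eq_map s _ ?_]
    · rw [List.map_map]; rfl
    · intro i hi
      simp only [List.mem_map] at hi
      obtain ⟨x, _, rfl⟩ := hi
      exact ⟨PySem.Int.mod_nonneg _ hn, PySem.Int.mod_lt _ hn⟩
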